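-- pv_equiv track=rewrite | github.com/kll/boostburn | src/boostburn/pricing_scraper.py | _find_model_header
-- ===== SOURCE A (Python) =====
-- from typing import Dict, Iterable, Optional
--
-- def _find_model_header(headers: list[str]) -> Optional[int]:
--     candidates: list[tuple[int, int]] = []
--     for idx, header in enumerate(headers):
--         if "model" not in header:
--             continue
--         score = 0
--         if header.strip() == "model":
--             score += 2
--         if "provider" in header:
--             score -= 2
--         if "name" in header:
--             score += 1
--         candidates.append((score, idx))
--     if not candidates:
--         return None
--     candidates.sort(reverse=True)
--     return candidates[0][1]
-- ===== SOURCE B (Python) =====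
-- def _find_model_header(headers):
--     def _score(h):
--         return ((2 if h.strip() == "model" else 0)
--                 - (2 if "provider" in h else 0)
--                 + (1 if "name" in h else 0))
--     best = max(((_score(h), i) for i, h in enumerate(headers) if "model" in h),
--                default=None)
--     return None if best is None else best[1]
-- ===== Notes on version B (the rewrite author's own statement) =====
-- stated objective: idiomatic
-- what changed: Replaced build-candidate-list-then-reverse-sort-and-take-head with a generator of (score, idx) pairs fed to built-in max (default=None); score is computed as one arithmetic expression instead of sequential accumulation, and no list is materialised and no sort happens.
import Mathlib
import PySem

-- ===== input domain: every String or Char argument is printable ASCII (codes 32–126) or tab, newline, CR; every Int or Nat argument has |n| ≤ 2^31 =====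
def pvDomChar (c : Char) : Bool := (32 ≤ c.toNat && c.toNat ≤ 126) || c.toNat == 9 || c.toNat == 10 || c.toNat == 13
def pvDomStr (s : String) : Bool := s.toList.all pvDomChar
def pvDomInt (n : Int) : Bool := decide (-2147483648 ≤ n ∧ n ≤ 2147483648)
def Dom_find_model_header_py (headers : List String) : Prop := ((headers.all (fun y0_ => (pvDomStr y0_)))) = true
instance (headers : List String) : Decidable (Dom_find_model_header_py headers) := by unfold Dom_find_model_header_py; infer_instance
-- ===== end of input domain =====

-- B replaces A's build-candidates/reverse-sort/take-head with a direct maximum of the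
-- (score, idx) pairs and a one-expression arithmetic score (idiomatic, no sort).

-- ===== PORT A =====
def find_model_header_py (headers : List String) : Option Int :=
  let candidates : List (Int × Int) :=
    (PySem.List.enumerate headers).foldl
      (fun acc p =>
        if PySem.Str.isIn "model" p.2 = false then acc
        else
          let score : Int := 0
          let score := if PySem.Str.strip p.2 == "model" then score + 2 else score
          let score := if PySem.Str.isIn "provider" p.2 then score - 2 else score
          let score := if PySem.Str.isIn "name" p.2 then score + 1 else score
          acc ++ [(score, p.1)]) []
  if candidates.isEmpty then none
  else
    -- candidates.sort(reverse=True): Python tuple comparison is lexicographic = toLex on Int × Int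
    match PySem.List.pyGet? (PySem.List.sorted candidates (fun q => toLex q) true) 0 with
    | some q => some q.2
    | none => none

-- ===== PORT B =====
-- Source B's _score helper: one arithmetic expression
def fmhScore (h : String) : Int :=
  (if PySem.Str.strip h == "model" then (2 : Int) else 0)
  - (if PySem.Str.isIn "provider" h then (2 : Int) else 0)
  + (if PySem.Str.isIn "name" h then (1 : Int) else 0)

-- max(generator, default=None) over Python tuples = PySem.List.max? with lexicographic key
def find_model_header_py_alt (headers : List String) : Option Int :=
  match PySem.List.max?
      ((PySem.List.enumerate headers).filterMap
        (fun p => if PySem.Str.isIn "model" p.2 then some (fmhScore p.2, p.1) else none))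
      (fun q => toLex q) with
  | none => none
  | some best => some best.2

-- ===== PRECONDITION & SPEC =====
def Spec_find_model_header_py (headers : List String) (out : Option Int) : Prop := out = find_model_header_py_alt headers
instance (headers : List String) (out : Option Int) : Decidable (Spec_find_model_header_py headers out) := by unfold Spec_find_model_header_py; infer_instance

-- ===== CLAIM =====
def Claim_equal_find_model_header_py : Prop := ∀ (headers : List String), Dom_find_model_header_py headers → Spec_find_model_header_py headers (find_model_header_py headers)

-- ===== LEMMAS AND PROOFS =====

-- A's loop body is a guarded append of (B's arithmetic score, index)
lemma lamA_eq :
    (fun (acc : List (Int × Int)) (p : Int × String) =>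
        if PySem.Str.isIn "model" p.2 = false then acc
        else
          let score : Int := 0
          let score := if PySem.Str.strip p.2 == "model" then score + 2 else score
          let score := if PySem.Str.isIn "provider" p.2 then score - 2 else score
          let score := if PySem.Str.isIn "name" p.2 then score + 1 else score
          acc ++ [(score, p.1)])
    = fun acc p => if PySem.Str.isIn "model" p.2 then acc ++ [(fmhScore p.2, p.1)] else acc := by
  funext acc p
  unfold fmhScore
  cases h : PySem.Str.isIn "model" p.2 <;> simp [h] <;> split_ifs <;> simp_all <;> omega

-- guarded append fold = filter-then-map
lemma foldl_guard_append {α β : Type} (keep : α → Bool) (f : α → β)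
    (l : List α) (acc : List β) :
    l.foldl (fun acc p => if keep p then acc ++ [f p] else acc) acc
      = acc ++ (l.filter keep).map f := by
  induction l generalizing acc with
  | nil => simp
  | cons x t ih => cases h : keep x <;> simp [List.foldl, h, ih]

-- B's filterMap builds the same candidate list
lemma filterMap_eq_filter_map {α β : Type} (keep : α → Bool) (f : α → β) (l : List α) :
    l.filterMap (fun p => if keep p then some (f p) else none)
      = (l.filter keep).map f := by
  induction l with
  | nil => simp
  | cons x t ih => cases h : keep x <;> simp [h, ih]

theorem find_model_header_py_spec : Claim_equal_find_model_header_py := by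
  intro headers _
  unfold Spec_find_model_header_py find_model_header_py find_model_header_py_alt
  rw [lamA_eq, foldl_guard_append, filterMap_eq_filter_map]
  simp only [List.nil_append]
  set cs : List (Int × Int) :=
    ((PySem.List.enumerate headers).filter (fun p => PySem.Str.isIn "model" p.2)).map
      (fun p => (fmhScore p.2, p.1)) with hcs
  rcases eq_or_ne cs [] with hnil | hne
  · rw [hnil]
    simp [(PySem.List.max?_eq_none_iff ([] : List (Int × Int)) (fun q => toLex q)).mpr rfl]
  · have hAne : ¬ cs.isEmpty := by simp [List.isEmpty_iff, hne]
    -- B's side: the maximum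
    cases hmax : PySem.List.max? cs (fun q => toLex q) with
    | none => exact absurd ((PySem.List.max?_eq_none_iff _ _).mp hmax) hne
    | some b =>
      have hbmem : b ∈ cs := PySem.List.max?_mem hmax
      have hbmax : ∀ y ∈ cs, toLex y ≤ toLex b := PySem.List.max?_isMax hmax
      -- indices in cs are pairwise distinct
      have hpw : cs.Pairwise (fun a b => a.2 < b.2) := by
        rw [hcs]
        refine List.Pairwise.map _ ?_ (List.Pairwise.filter _ (PySem.List.pairwise_lt_enumerate headers 0))
        intro a b h; exact h
      -- A's side: head of the reverse-sorted list
      have hsne : PySem.List.sorted cs (fun q => toLex q) true ≠ [] := by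
        intro h
        have := PySem.List.length_sorted cs (fun q => toLex q) true
        rw [h] at this
        exact hne (List.eq_nil_of_length_eq_zero this.symm)
      cases hsort : PySem.List.sorted cs (fun q => toLex q) true with
      | nil => exact absurd hsort hsne
      | cons m t =>
        have hmmem : m ∈ cs := by
          rw [← PySem.List.mem_sorted (key := fun q => toLex q) (rev := true), hsort]
          simp
        have hmmax : ∀ y ∈ cs, toLex y ≤ toLex m :=
          PySem.List.key_head_sorted_rev_ge cs (fun q => toLex q) hsort
        have hbm : m = b := toLex.injective (le_antisymm (hbmax m hmmem) (hmmax b hbmem))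
        simp [hAne, hbm, PySem.List.pyGet?, PySem.List.pyIdx?]
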